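-- pv_equiv track=rewrite | github.com/jinseo0904/contextual_word_puzzle | generate_spelling_bee_puzzle.py | is_simple_affix_variant
-- ===== SOURCE A (Python) =====
-- def is_simple_affix_variant(base: str, candidate: str) -> bool:
--     """Return True if candidate is base with a simple affix like -ing, -er, -s, -ness, or re-."""
--     base = base.lower()
--     candidate = candidate.lower()
--     if not base or not candidate:
--         return False
--
--     # Prefix check
--     simple_prefixes = ("re",)
--     for prefix in simple_prefixes:
--         if candidate.startswith(prefix) and candidate[len(prefix):] == base:
--             return True
--
--     # Suffix checks
--     suffixes = ("ing", "er", "ness", "s")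
--     for suffix in suffixes:
--         if not candidate.endswith(suffix):
--             continue
--
--         stripped = candidate[:-len(suffix)] if suffix else candidate
--         if stripped == base:
--             return True
--
--         if suffix in ("ing", "er") and len(base) >= 1 and stripped == base + base[-1]:
--             return True
--
--     return False
-- ===== SOURCE B (Python) =====
-- def is_simple_affix_variant(base: str, candidate: str) -> bool:
--     """Return True if candidate is base with a simple affix like -ing, -er, -s, -ness, or re-."""
--     b = base.lower()
--     c = candidate.lower()
--     if not b or not c:
--         return False
--     d = b[-1]
--     variants = {"re" + b, b + "ing", b + "er", b + "ness", b + "s",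
--                 b + d + "ing", b + d + "er"}
--     return c in variants
-- ===== Notes on version B (the rewrite author's own statement) =====
-- stated objective: idiomatic
-- what changed: Instead of stripping each affix off the candidate and comparing the remainder to base, B generates the finite set of all seven legal affixed spellings of base (re-, -ing, -er, -ness, -s, and the consonant-doubled -ing/-er forms) and tests candidate membership in that set.
import Mathlib
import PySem

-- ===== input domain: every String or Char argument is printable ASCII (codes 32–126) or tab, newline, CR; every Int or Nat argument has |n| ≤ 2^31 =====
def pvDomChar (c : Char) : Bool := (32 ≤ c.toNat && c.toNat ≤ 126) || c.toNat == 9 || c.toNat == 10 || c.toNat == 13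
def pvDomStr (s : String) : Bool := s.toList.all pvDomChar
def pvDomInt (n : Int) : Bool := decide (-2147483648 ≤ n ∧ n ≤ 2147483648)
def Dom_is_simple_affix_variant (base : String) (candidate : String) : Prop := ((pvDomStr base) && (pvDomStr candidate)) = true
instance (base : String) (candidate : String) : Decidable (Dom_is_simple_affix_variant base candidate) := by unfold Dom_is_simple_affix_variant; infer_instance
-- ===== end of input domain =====

-- B tests the candidate for membership in the generated set of base's seven affixed forms,
-- instead of A's strip-and-compare over each affix (objective: more idiomatic; same cost).

-- ===== PORT A =====
def is_simple_affix_variant (base : String) (candidate : String) : Bool :=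
  let b := PySem.Chars.lower base.toList
  let c := PySem.Chars.lower candidate.toList
  if b = [] || c = [] then false
  else if ["re".toList].any (fun pre =>
      PySem.Chars.startswith c pre &&
        decide (PySem.List.slice c (some (pre.length : Int)) none = b)) then true
  else
    ["ing".toList, "er".toList, "ness".toList, "s".toList].any (fun suf =>
      PySem.Chars.endswith c suf &&
        (let stripped := PySem.List.slice c none (some (-(suf.length : Int)))
         decide (stripped = b) ||
           ((decide (suf = "ing".toList) || decide (suf = "er".toList)) &&
            decide (1 ≤ b.length) &&
            (match PySem.List.pyGet? b (-1) with
             | some ch => decide (stripped = b ++ [ch])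
             | none => false))))

-- ===== PORT B =====
def is_simple_affix_variant_alt (base : String) (candidate : String) : Bool :=
  let b := PySem.Chars.lower base.toList
  let c := PySem.Chars.lower candidate.toList
  if b = [] || c = [] then false
  else
    match PySem.List.pyGet? b (-1) with
    | none => false
    | some d =>
      let variants : PySem.Set (List Char) := PySem.Set.ofList
        ["re".toList ++ b, b ++ "ing".toList, b ++ "er".toList, b ++ "ness".toList,
         b ++ "s".toList, b ++ [d] ++ "ing".toList, b ++ [d] ++ "er".toList]
      PySem.Set.contains variants c

-- ===== PRECONDITION & SPEC =====
def Spec_is_simple_affix_variant (base : String) (candidate : String) (out : Bool) : Prop := out = is_simple_affix_variant_alt base candidate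
instance (base : String) (candidate : String) (out : Bool) : Decidable (Spec_is_simple_affix_variant base candidate out) := by unfold Spec_is_simple_affix_variant; infer_instance

-- ===== CLAIM (what is proved, stated in full; the proofs are below) =====
def Claim_equal_is_simple_affix_variant : Prop := ∀ (base : String) (candidate : String), Dom_is_simple_affix_variant base candidate → Spec_is_simple_affix_variant base candidate (is_simple_affix_variant base candidate)

-- ===== LEMMAS AND PROOFS =====

-- candidate startswith p and the rest equals t  ⇔  candidate = p ++ t
lemma pv_prekey (c t p : List Char) :
    (PySem.Chars.startswith c p &&
      decide (PySem.List.slice c (some (p.length : Int)) none = t)) = decide (c = p ++ t) := by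
  rw [PySem.List.slice_from_natCast]
  rw [Bool.eq_iff_iff]
  simp only [Bool.and_eq_true, decide_eq_true_eq, PySem.Chars.startswith_iff]
  constructor
  · rintro ⟨⟨r, rfl⟩, h⟩
    simp only [List.drop_left] at h
    subst h; rfl
  · rintro rfl
    exact ⟨⟨t, rfl⟩, by simp⟩

-- candidate endswith suf and the stripped front equals t  ⇔  candidate = t ++ suf
lemma pv_sufkey (c t suf : List Char) (h : suf ≠ []) :
    (PySem.Chars.endswith c suf &&
      decide (PySem.List.slice c none (some (-(suf.length : Int))) = t)) = decide (c = t ++ suf) := by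
  rw [PySem.List.slice_to_neg_natCast _ _ (List.length_pos_iff.mpr h)]
  rw [Bool.eq_iff_iff]
  simp only [Bool.and_eq_true, decide_eq_true_eq, PySem.Chars.endswith_iff]
  constructor
  · rintro ⟨⟨r, rfl⟩, hk⟩
    have hl : (r ++ suf).length - suf.length = r.length := by simp
    rw [hl, List.take_left] at hk
    subst hk; rfl
  · rintro rfl
    refine ⟨⟨t, rfl⟩, ?_⟩
    have hl : (t ++ suf).length - suf.length = t.length := by simp
    rw [hl, List.take_left]

-- the core equivalence on the lowered, nonempty character lists
lemma pv_core (b c : List Char) (hb : b ≠ []) (_hc : c ≠ []) :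
    ((if ["re".toList].any (fun pre =>
        PySem.Chars.startswith c pre &&
          decide (PySem.List.slice c (some (pre.length : Int)) none = b)) then true
      else
        ["ing".toList, "er".toList, "ness".toList, "s".toList].any (fun suf =>
          PySem.Chars.endswith c suf &&
            (decide (PySem.List.slice c none (some (-(suf.length : Int))) = b) ||
               ((decide (suf = "ing".toList) || decide (suf = "er".toList)) &&
                decide (1 ≤ b.length) &&
                (match PySem.List.pyGet? b (-1) with
                 | some ch => decide (PySem.List.slice c none (some (-(suf.length : Int))) = b ++ [ch])
                 | none => false))))) : Bool)
    = (match PySem.List.pyGet? b (-1) with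
       | none => false
       | some d =>
         PySem.Set.contains (PySem.Set.ofList
           ["re".toList ++ b, b ++ "ing".toList, b ++ "er".toList, b ++ "ness".toList,
            b ++ "s".toList, b ++ [d] ++ "ing".toList, b ++ [d] ++ "er".toList]) c) := by
  obtain hnil | ⟨bs, d, rfl⟩ := b.eq_nil_or_concat'
  · exact absurd hnil hb
  rw [PySem.List.pyGet?_neg_one_append_singleton]
  have hlen : decide (1 ≤ (bs ++ [d]).length) = true := by simp
  have tness : (decide ("ness".toList = "ing".toList) || decide ("ness".toList = "er".toList)) = false := by decide
  have ts : (decide ("s".toList = "ing".toList) || decide ("s".toList = "er".toList)) = false := by decide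
  simp only [List.any_cons, List.any_nil, Bool.or_false, hlen, tness, ts,
    Bool.false_and, Bool.and_true]
  simp only [decide_true, Bool.true_or, Bool.or_true, Bool.true_and]
  rw [Bool.and_or_distrib_left, Bool.and_or_distrib_left]
  rw [pv_prekey c (bs ++ [d]) "re".toList,
      pv_sufkey c (bs ++ [d]) "ing".toList (by decide),
      pv_sufkey c (bs ++ [d] ++ [d]) "ing".toList (by decide),
      pv_sufkey c (bs ++ [d]) "er".toList (by decide),
      pv_sufkey c (bs ++ [d] ++ [d]) "er".toList (by decide),
      pv_sufkey c (bs ++ [d]) "ness".toList (by decide),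
      pv_sufkey c (bs ++ [d]) "s".toList (by decide)]
  rw [Bool.eq_iff_iff]
  simp [PySem.Set.contains, PySem.Set.mem_ofList, List.append_assoc]
  tauto

-- ===== VERDICT (by name: the statement is the Claim_ definition above) =====
theorem is_simple_affix_variant_spec : Claim_equal_is_simple_affix_variant := by
  intro base candidate _
  unfold Spec_is_simple_affix_variant is_simple_affix_variant is_simple_affix_variant_alt
  by_cases hg : (decide (PySem.Chars.lower base.toList = []) ||
      decide (PySem.Chars.lower candidate.toList = [])) = true
  · simp only [if_pos hg]
  · have hb : PySem.Chars.lower base.toList ≠ [] := by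
      intro h; exact hg (by simp [h])
    have hc : PySem.Chars.lower candidate.toList ≠ [] := by
      intro h; exact hg (by simp [h])
    simp only [if_neg hg]
    exact pv_core _ _ hb hc
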